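-- pv_equiv track=rewrite | github.com/BenCorneau/benc-advent-of-code-2021 | day02/part2.py | calculate_movement
-- ===== SOURCE A (Python) =====
-- def calculate_movement(data):
--     depth = 0
--     horizontal_pos = 0
--     aim = 0
--     for dir, distance in data:
--         if dir == "up":
--             aim -= distance
--
--         if dir == "down":
--             aim += distance
--
--         if dir == "forward":
--             horizontal_pos += distance
--             depth += aim * distance
--     return depth, horizontal_pos
-- ===== SOURCE B (Python) =====
-- def calculate_movement(data):
--     moves = [(d, x) for d, x in data]
--     aims = []
--     a = 0
--     for d, x in moves:
--         a += x if d == "down" else -x if d == "up" else 0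
--         aims.append(a)
--     horizontal_pos = sum(x for (d, x), _ in zip(moves, aims) if d == "forward")
--     depth = sum(a * x for (d, x), a in zip(moves, aims) if d == "forward")
--     return depth, horizontal_pos
-- ===== Notes on version B (the rewrite author's own statement) =====
-- stated objective: alternative
-- what changed: Replaces the single stateful loop by a prefix-sum decomposition: first build the running-aim table, then compute horizontal position and depth as two sums over the forward moves zipped with that table.
import Mathlib
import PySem

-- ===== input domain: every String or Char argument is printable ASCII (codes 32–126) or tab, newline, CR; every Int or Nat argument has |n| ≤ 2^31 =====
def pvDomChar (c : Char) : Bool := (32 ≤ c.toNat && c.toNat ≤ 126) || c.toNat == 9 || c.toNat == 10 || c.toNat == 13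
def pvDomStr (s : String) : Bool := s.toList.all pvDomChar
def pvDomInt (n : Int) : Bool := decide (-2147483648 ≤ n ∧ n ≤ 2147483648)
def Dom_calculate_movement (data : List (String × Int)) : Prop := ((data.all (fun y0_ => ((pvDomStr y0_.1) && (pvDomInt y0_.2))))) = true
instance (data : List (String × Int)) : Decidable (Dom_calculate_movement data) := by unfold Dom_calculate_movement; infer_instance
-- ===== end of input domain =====

-- B replaces A's single stateful loop by a prefix-sum (running-aim table) decomposition; objective: alternative.

-- ===== PORT A =====
-- the body of A's for-loop, state = (depth, horizontal_pos, aim)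
def pvStepA (s : Int × Int × Int) (p : String × Int) : Int × Int × Int :=
  let depth := s.1
  let horizontal_pos := s.2.1
  let aim := s.2.2
  let aim := if p.1 == "up" then aim - p.2 else aim
  let aim := if p.1 == "down" then aim + p.2 else aim
  if p.1 == "forward" then (depth + aim * p.2, horizontal_pos + p.2, aim)
  else (depth, horizontal_pos, aim)

def calculate_movement (data : List (String × Int)) : Int × Int :=
  let st := data.foldl pvStepA (0, 0, 0)
  (st.1, st.2.1)

-- ===== PORT B =====
-- one step of Source B's aim-building loop: a += delta; aims.append(a)
def pvAimStep (acc : Int × List Int) (p : String × Int) : Int × List Int :=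
  let a := acc.1 + (if p.1 == "down" then p.2 else if p.1 == "up" then -p.2 else 0)
  (a, acc.2 ++ [a])

def calculate_movement_alt (data : List (String × Int)) : Int × Int :=
  let moves := data.map (fun p => (p.1, p.2))
  let aims := (moves.foldl pvAimStep (0, [])).2
  let horizontal_pos :=
    (((moves.zip aims).filter (fun q => q.1.1 == "forward")).map (fun q => q.1.2)).sum
  let depth :=
    (((moves.zip aims).filter (fun q => q.1.1 == "forward")).map (fun q => q.2 * q.1.2)).sum
  (depth, horizontal_pos)

-- ===== PRECONDITION & SPEC =====
def Spec_calculate_movement (data : List (String × Int)) (out : Int × Int) : Prop := out = calculate_movement_alt data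
instance (data : List (String × Int)) (out : Int × Int) : Decidable (Spec_calculate_movement data out) := by unfold Spec_calculate_movement; infer_instance

-- ===== CLAIM (what is proved, stated in full; the proofs are below) =====
def Claim_equal_calculate_movement : Prop := ∀ (data : List (String × Int)), Dom_calculate_movement data → Spec_calculate_movement data (calculate_movement data)

-- ===== LEMMAS AND PROOFS =====

def pvDelta (p : String × Int) : Int :=
  if p.1 == "down" then p.2 else if p.1 == "up" then -p.2 else 0

-- the running-aim sequence starting from aim a
def pvAims (a : Int) : List (String × Int) → List Int
  | [] => []
  | p :: xs => (a + pvDelta p) :: pvAims (a + pvDelta p) xs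

theorem pvAimStep_fold (xs : List (String × Int)) : ∀ (a : Int) (l : List Int),
    xs.foldl pvAimStep (a, l) = (a + (xs.map pvDelta).sum, l ++ pvAims a xs) := by
  induction xs with
  | nil => intro a l; simp [pvAims]
  | cons p xs ih =>
    intro a l
    rw [List.foldl_cons]
    show xs.foldl pvAimStep (a + pvDelta p, l ++ [a + pvDelta p]) = _
    rw [ih]
    simp only [pvAims, List.map_cons, List.sum_cons, Prod.mk.injEq]
    exact ⟨by ring, by simp⟩

theorem pvStepA_eq (s : Int × Int × Int) (p : String × Int) :
    pvStepA s p =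
      if p.1 == "forward" then (s.1 + s.2.2 * p.2, s.2.1 + p.2, s.2.2 + pvDelta p)
      else (s.1, s.2.1, s.2.2 + pvDelta p) := by
  by_cases hf : p.1 = "forward"
  · simp [pvStepA, pvDelta, hf]
  · by_cases hd : p.1 = "down"
    · simp [pvStepA, pvDelta, hd]
    · by_cases hu : p.1 = "up"
      · simp [pvStepA, pvDelta, hu]; ring
      · simp [pvStepA, pvDelta, hf, hd, hu]

-- A's loop from state (d, h, a), expressed through the prefix-aim sums
theorem pvLoopA (xs : List (String × Int)) : ∀ (d h a : Int),
    xs.foldl pvStepA (d, h, a)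
    = (d + (((xs.zip (pvAims a xs)).filter (fun q => q.1.1 == "forward")).map (fun q => q.2 * q.1.2)).sum,
       h + (((xs.zip (pvAims a xs)).filter (fun q => q.1.1 == "forward")).map (fun q => q.1.2)).sum,
       a + (xs.map pvDelta).sum) := by
  induction xs with
  | nil => intro d h a; simp [pvAims]
  | cons p xs ih =>
    intro d h a
    rw [List.foldl_cons, pvStepA_eq]
    by_cases hf : p.1 = "forward"
    · have hδ : pvDelta p = 0 := by simp [pvDelta, hf]
      rw [if_pos (by simpa using hf)]
      show xs.foldl pvStepA (d + a * p.2, h + p.2, a + pvDelta p) = _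
      rw [hδ, add_zero, ih]
      simp only [pvAims, hδ, add_zero, List.zip_cons_cons, List.filter_cons, List.map_cons,
        List.sum_cons, beq_iff_eq, hf, Prod.mk.injEq]
      refine ⟨?_, ?_, by ring⟩ <;> simp <;> ring
    · rw [if_neg (by simpa using hf)]
      show xs.foldl pvStepA (d, h, a + pvDelta p) = _
      rw [ih]
      simp only [pvAims, List.zip_cons_cons, List.filter_cons, List.map_cons,
        List.sum_cons, beq_iff_eq, Prod.mk.injEq]
      refine ⟨?_, ?_, by ring⟩ <;> simp [hf]

-- ===== VERDICT (by name: the statement is the Claim_ definition above) =====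
theorem calculate_movement_spec : Claim_equal_calculate_movement := by
  intro data _
  unfold Spec_calculate_movement calculate_movement calculate_movement_alt
  simp only [Prod.mk.eta, pvLoopA, pvAimStep_fold, List.nil_append]
  simp
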